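-- pv_equiv track=rewrite | github.com/LianguangXue/VPIN | Tick_VPIN.py | constuct_buckets_update
-- ===== SOURCE A (Python) =====
-- def constuct_buckets_update(temp,temp_buy,temp_sell,volume_buy_bar_list ,volume_sell_bar_list,
--                             time_list,cut_point_list,bars_per_bucket = 30):
--     n = len(volume_buy_bar_list)
--     volume_buy_bucket_list=[]
--     volume_sell_bucket_list=[]
--     diff_list = []
--     time_bucket_list=[]
--     cut_point_bucket_list = []
--     temp_diff = 0
--     for i in range(n):
--         temp += 1
--         temp_buy += volume_buy_bar_list[i]
--         temp_sell += volume_sell_bar_list[i]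
--         if temp == bars_per_bucket:
--             temp_diff = abs(temp_buy-temp_sell)
--             diff_list.append(temp_diff)
--             volume_buy_bucket_list.append(temp_buy)
--             volume_sell_bucket_list.append(temp_sell)
--             time_bucket_list.append(time_list[i])
--             cut_point_bucket_list.append(cut_point_list[i])
--             temp = 0
--             temp_buy = 0
--             temp_sell = 0
--     assert(len(diff_list)==len(time_bucket_list))
--     bucket_remain = [temp,temp_buy,temp_sell]
--     return diff_list ,time_bucket_list,cut_point_bucket_list,bucket_remain
-- ===== SOURCE B (Python) =====
-- def constuct_buckets_update(temp, temp_buy, temp_sell, volume_buy_bar_list, volume_sell_bar_list,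
--                             time_list, cut_point_list, bars_per_bucket=30):
--     n = len(volume_buy_bar_list)
--     # bucket-end indices: first one at bars_per_bucket - temp - 1, then every bars_per_bucket bars
--     ends = []
--     e = bars_per_bucket - temp - 1
--     if e >= 0:
--         while e < n:
--             ends.append(e)
--             if bars_per_bucket < 1:
--                 break
--             e += bars_per_bucket
--     diff_list = []
--     time_bucket_list = []
--     cut_point_bucket_list = []
--     start = 0
--     buy0, sell0 = temp_buy, temp_sell
--     for end in ends:
--         b = buy0 + sum(volume_buy_bar_list[start:end + 1])
--         s = sell0 + sum(volume_sell_bar_list[start:end + 1])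
--         diff_list.append(abs(b - s))
--         time_bucket_list.append(time_list[end])
--         cut_point_bucket_list.append(cut_point_list[end])
--         start = end + 1
--         buy0, sell0 = 0, 0
--     rem_temp = temp + n if not ends else n - 1 - ends[-1]
--     rem_buy = buy0 + sum(volume_buy_bar_list[start:n])
--     rem_sell = sell0 + sum(volume_sell_bar_list[start:n])
--     bucket_remain = [rem_temp, rem_buy, rem_sell]
--     return diff_list, time_bucket_list, cut_point_bucket_list, bucket_remain
-- ===== Notes on version B (the rewrite author's own statement) =====
-- stated objective: alternative
-- what changed: A walks every bar with a counter that resets on each bucket close; B precomputes the list of bucket-end indices from the arithmetic progression starting at bars_per_bucket-temp-1, sums each chunk with a slice, and derives the remainder (temp, buy, sell) in closed form from the last boundary.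
import Mathlib
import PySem

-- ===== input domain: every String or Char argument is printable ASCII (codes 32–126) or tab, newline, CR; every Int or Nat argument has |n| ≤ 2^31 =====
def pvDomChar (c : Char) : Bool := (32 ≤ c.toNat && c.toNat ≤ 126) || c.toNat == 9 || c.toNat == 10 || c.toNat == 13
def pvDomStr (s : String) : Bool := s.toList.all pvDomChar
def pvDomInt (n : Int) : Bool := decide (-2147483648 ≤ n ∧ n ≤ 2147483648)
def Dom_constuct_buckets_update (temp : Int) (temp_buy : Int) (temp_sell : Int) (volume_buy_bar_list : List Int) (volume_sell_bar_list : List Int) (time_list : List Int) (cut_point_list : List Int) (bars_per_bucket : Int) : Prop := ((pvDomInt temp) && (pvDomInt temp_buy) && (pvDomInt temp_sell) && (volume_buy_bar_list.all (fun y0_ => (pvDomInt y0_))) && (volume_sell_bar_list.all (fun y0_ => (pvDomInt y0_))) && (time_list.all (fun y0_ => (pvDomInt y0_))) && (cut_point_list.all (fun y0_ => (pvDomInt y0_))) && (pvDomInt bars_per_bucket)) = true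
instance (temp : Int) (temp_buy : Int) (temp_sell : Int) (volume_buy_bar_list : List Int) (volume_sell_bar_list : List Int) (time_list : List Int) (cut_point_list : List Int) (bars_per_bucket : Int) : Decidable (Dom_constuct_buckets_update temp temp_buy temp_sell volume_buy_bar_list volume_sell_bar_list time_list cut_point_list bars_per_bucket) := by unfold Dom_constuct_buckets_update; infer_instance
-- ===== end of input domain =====

-- B replaces A's per-bar counter loop by precomputing the bucket-end indices and summing each
-- chunk with a slice (objective: alternative decomposition, same cost). Equality of the RETURN
-- value is proved on every input where the Python A returns (Pre_ below excludes A's IndexErrors).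

-- ===== PORT A =====
-- A-side helper: the body of A's `for i in range(n)` loop, acting on the state
-- (temp, temp_buy, temp_sell, diff_list, time_bucket_list, cut_point_bucket_list).
-- xs[i] is ported as (pyGet? xs i).getD 0: inside Pre_ the index is always in range.
def pvStepA (vb vs tl cl : List Int) (bpb : Int)
    (s : Int × Int × Int × List Int × List Int × List Int) (i : Nat) :
    Int × Int × Int × List Int × List Int × List Int :=
  let t := s.1 + 1
  let b := s.2.1 + (PySem.List.pyGet? vb (i : Int)).getD 0
  let se := s.2.2.1 + (PySem.List.pyGet? vs (i : Int)).getD 0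
  if t = bpb then
    (0, 0, 0, s.2.2.2.1 ++ [|b - se|],
     s.2.2.2.2.1 ++ [(PySem.List.pyGet? tl (i : Int)).getD 0],
     s.2.2.2.2.2 ++ [(PySem.List.pyGet? cl (i : Int)).getD 0])
  else (t, b, se, s.2.2.2.1, s.2.2.2.2.1, s.2.2.2.2.2)

def constuct_buckets_update (temp : Int) (temp_buy : Int) (temp_sell : Int) (volume_buy_bar_list : List Int) (volume_sell_bar_list : List Int) (time_list : List Int) (cut_point_list : List Int) (bars_per_bucket : Int) : List Int × List Int × List Int × List Int :=
  let st := (List.range volume_buy_bar_list.length).foldl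
    (pvStepA volume_buy_bar_list volume_sell_bar_list time_list cut_point_list bars_per_bucket)
    (temp, temp_buy, temp_sell, ([] : List Int), ([] : List Int), ([] : List Int))
  (st.2.2.2.1, st.2.2.2.2.1, st.2.2.2.2.2, [st.1, st.2.1, st.2.2.1])

-- ===== PORT B =====
-- B-side helper: Source B's `while e < n: ends.append(e); if bars_per_bucket < 1: break; e += bars_per_bucket`.
def pvEndsLoop (n : Nat) (bpb : Int) (e : Int) : List Int :=
  if _h : e < (n : Int) then
    if _h2 : bpb < 1 then [e]
    else e :: pvEndsLoop n bpb (e + bpb)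
  else []
termination_by ((n : Int) - e).toNat
decreasing_by omega

-- B-side helper: Source B's ends list (the `if e >= 0` guard around the while loop).
def pvEnds (temp bpb : Int) (n : Nat) : List Int :=
  if 0 ≤ bpb - temp - 1 then pvEndsLoop n bpb (bpb - temp - 1) else []

-- B-side helper: the body of Source B's `for end in ends` loop, state (start, buy0, sell0, diff_list, time_bucket_list, cut_point_bucket_list).
def pvStepB (vb vs tl cl : List Int)
    (s : Int × Int × Int × List Int × List Int × List Int) (e : Int) :
    Int × Int × Int × List Int × List Int × List Int :=
  let b := s.2.1 + (PySem.List.slice vb (some s.1) (some (e + 1))).sum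
  let se := s.2.2.1 + (PySem.List.slice vs (some s.1) (some (e + 1))).sum
  (e + 1, 0, 0, s.2.2.2.1 ++ [|b - se|],
   s.2.2.2.2.1 ++ [(PySem.List.pyGet? tl e).getD 0],
   s.2.2.2.2.2 ++ [(PySem.List.pyGet? cl e).getD 0])

def constuct_buckets_update_alt (temp : Int) (temp_buy : Int) (temp_sell : Int) (volume_buy_bar_list : List Int) (volume_sell_bar_list : List Int) (time_list : List Int) (cut_point_list : List Int) (bars_per_bucket : Int) : List Int × List Int × List Int × List Int :=
  let n := volume_buy_bar_list.length
  let ends := pvEnds temp bars_per_bucket n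
  let st := ends.foldl
    (pvStepB volume_buy_bar_list volume_sell_bar_list time_list cut_point_list)
    ((0 : Int), temp_buy, temp_sell, ([] : List Int), ([] : List Int), ([] : List Int))
  let remTemp := match ends.getLast? with
    | none => temp + (n : Int)
    | some L => (n : Int) - 1 - L
  let remBuy := st.2.1 + (PySem.List.slice volume_buy_bar_list (some st.1) (some (n : Int))).sum
  let remSell := st.2.2.1 + (PySem.List.slice volume_sell_bar_list (some st.1) (some (n : Int))).sum
  (st.2.2.2.1, st.2.2.2.2.1, st.2.2.2.2.2, [remTemp, remBuy, remSell])

-- ===== PRECONDITION & SPEC =====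
-- Pre_ holds exactly when Python A returns without an exception: it raises IndexError iff
-- volume_sell_bar_list is shorter than volume_buy_bar_list, or some bucket-end index i
-- (i = bars_per_bucket-temp-1 or a further multiple of bars_per_bucket along) falls outside
-- time_list or cut_point_list.
def Pre_constuct_buckets_update (temp : Int) (temp_buy : Int) (temp_sell : Int) (volume_buy_bar_list : List Int) (volume_sell_bar_list : List Int) (time_list : List Int) (cut_point_list : List Int) (bars_per_bucket : Int) : Prop :=
  volume_buy_bar_list.length ≤ volume_sell_bar_list.length ∧
  ∀ i ∈ List.range volume_buy_bar_list.length,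
    ((bars_per_bucket - temp - 1 = (i : Int)) ∨
     (1 ≤ bars_per_bucket ∧ 0 ≤ bars_per_bucket - temp - 1 ∧
      bars_per_bucket - temp - 1 < (i : Int) ∧
      ((i : Int) - (bars_per_bucket - temp - 1)) % bars_per_bucket = 0)) →
    (i < time_list.length ∧ i < cut_point_list.length)
instance (temp : Int) (temp_buy : Int) (temp_sell : Int) (volume_buy_bar_list : List Int) (volume_sell_bar_list : List Int) (time_list : List Int) (cut_point_list : List Int) (bars_per_bucket : Int) : Decidable (Pre_constuct_buckets_update temp temp_buy temp_sell volume_buy_bar_list volume_sell_bar_list time_list cut_point_list bars_per_bucket) := by unfold Pre_constuct_buckets_update; infer_instance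

def pvWitness_constuct_buckets_update : Int × Int × Int × List Int × List Int × List Int × List Int × Int :=
  (0, 0, 0, [1, 2, 3], [1, 1, 1], [10, 20, 30], [4, 5, 6], 2)

def Spec_constuct_buckets_update (temp : Int) (temp_buy : Int) (temp_sell : Int) (volume_buy_bar_list : List Int) (volume_sell_bar_list : List Int) (time_list : List Int) (cut_point_list : List Int) (bars_per_bucket : Int) (out : List Int × List Int × List Int × List Int) : Prop := out = constuct_buckets_update_alt temp temp_buy temp_sell volume_buy_bar_list volume_sell_bar_list time_list cut_point_list bars_per_bucket
instance (temp : Int) (temp_buy : Int) (temp_sell : Int) (volume_buy_bar_list : List Int) (volume_sell_bar_list : List Int) (time_list : List Int) (cut_point_list : List Int) (bars_per_bucket : Int) (out : List Int × List Int × List Int × List Int) : Decidable (Spec_constuct_buckets_update temp temp_buy temp_sell volume_buy_bar_list volume_sell_bar_list time_list cut_point_list bars_per_bucket out) := by unfold Spec_constuct_buckets_update; infer_instance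

-- ===== CLAIM (what is proved, stated in full; the proofs are below) =====
def Claim_equal_constuct_buckets_update : Prop := ∀ (temp : Int) (temp_buy : Int) (temp_sell : Int) (volume_buy_bar_list : List Int) (volume_sell_bar_list : List Int) (time_list : List Int) (cut_point_list : List Int) (bars_per_bucket : Int), Dom_constuct_buckets_update temp temp_buy temp_sell volume_buy_bar_list volume_sell_bar_list time_list cut_point_list bars_per_bucket → Pre_constuct_buckets_update temp temp_buy temp_sell volume_buy_bar_list volume_sell_bar_list time_list cut_point_list bars_per_bucket → Spec_constuct_buckets_update temp temp_buy temp_sell volume_buy_bar_list volume_sell_bar_list time_list cut_point_list bars_per_bucket (constuct_buckets_update temp temp_buy temp_sell volume_buy_bar_list volume_sell_bar_list time_list cut_point_list bars_per_bucket)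


-- ===== LEMMAS AND PROOFS =====

-- every element of Source B's ends list lies in [e, n)
lemma pvEndsLoop_mem (n : Nat) (bpb e : Int) :
    ∀ x ∈ pvEndsLoop n bpb e, e ≤ x ∧ x < (n : Int) := by
  fun_induction pvEndsLoop n bpb e with
  | case1 e h h2 =>
      intro x hx
      simp only [List.mem_singleton] at hx
      subst hx; exact ⟨le_refl _, h⟩
  | case2 e h h2 ih =>
      intro x hx
      rcases List.mem_cons.mp hx with rfl | hx
      · exact ⟨le_refl _, h⟩
      · have := ih x hx; constructor <;> omega
  | case3 e h =>
      intro x hx; simp at hx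

-- how Source B's ends list grows when the bar count grows by one
lemma pvEndsLoop_succ (n : Nat) (bpb e : Int) :
    pvEndsLoop (n + 1) bpb e =
      pvEndsLoop n bpb e ++
        (match (pvEndsLoop n bpb e).getLast? with
         | none => if e = (n : Int) then [(n : Int)] else []
         | some L => if 1 ≤ bpb ∧ L + bpb = (n : Int) then [(n : Int)] else []) := by
  fun_induction pvEndsLoop n bpb e with
  | case1 e h h2 =>
      rw [pvEndsLoop]
      rw [dif_pos (by push_cast; omega : e < ((n + 1 : Nat) : Int))]
      rw [dif_pos h2]
      simp only [List.getLast?_singleton]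
      rw [if_neg (by omega)]
      simp
  | case2 e h h2 ih =>
      have hunf2 : pvEndsLoop (n + 1) bpb e = e :: pvEndsLoop (n + 1) bpb (e + bpb) := by
        rw [pvEndsLoop, dif_pos (by push_cast; omega : e < ((n + 1 : Nat) : Int)), dif_neg h2]
      rw [hunf2, ih]
      rcases hrest : pvEndsLoop n bpb (e + bpb) with _ | ⟨y, ys⟩
      · simp only [List.getLast?_nil, List.nil_append, List.cons_append,
          List.getLast?_singleton]
        by_cases hq : e + bpb = (n : Int)
        · have hb : (1 : Int) ≤ bpb := by omega
          simp [hq, hb]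
        · simp [hq]
      · -- both sides are e :: ((y :: ys) ++ extension); the two matches see the same getLast?
        simp only [List.cons_append, List.getLast?_cons_cons]
        rcases hL : (y :: ys).getLast? with _ | L
        · simp at hL
        · rfl
  | case3 e h =>
      rw [pvEndsLoop]
      simp only [List.getLast?_nil, List.nil_append]
      rw [pvEndsLoop]
      by_cases hq : e = (n : Int)
      · rw [if_pos hq]
        rw [dif_pos (by push_cast; omega : e < ((n + 1 : Nat) : Int))]
        by_cases h2 : bpb < 1
        · rw [dif_pos h2, hq]
        · rw [dif_neg h2]
          rw [pvEndsLoop, dif_neg (by push_cast; omega : ¬ e + bpb < ((n + 1 : Nat) : Int))]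
          rw [hq]
      · rw [if_neg hq]
        rw [dif_neg (by push_cast; omega : ¬ e < ((n + 1 : Nat) : Int))]

-- same fact lifted to pvEnds
lemma pvEnds_succ (t bpb : Int) (k : Nat) :
    pvEnds t bpb (k + 1) =
      pvEnds t bpb k ++
        (match (pvEnds t bpb k).getLast? with
         | none => if bpb - t - 1 = (k : Int) then [(k : Int)] else []
         | some L => if 1 ≤ bpb ∧ L + bpb = (k : Int) then [(k : Int)] else []) := by
  unfold pvEnds
  by_cases hg : 0 ≤ bpb - t - 1
  · rw [if_pos hg, if_pos hg]
    exact pvEndsLoop_succ k bpb _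
  · rw [if_neg hg, if_neg hg]
    show ([] : List Int) = [] ++ if bpb - t - 1 = (k : Int) then [(k : Int)] else []
    rw [if_neg (by omega), List.append_nil]

lemma pvEnds_last_bounds {t bpb : Int} {k : Nat} {L : Int}
    (h : (pvEnds t bpb k).getLast? = some L) : 0 ≤ L ∧ L < (k : Int) := by
  have hm : L ∈ pvEnds t bpb k := List.mem_of_getLast? h
  unfold pvEnds at hm
  split_ifs at hm with hg
  · have := pvEndsLoop_mem k bpb _ L hm
    constructor <;> omega
  · simp at hm

-- the start component of B's bucket fold is one past the last bucket end
lemma foldl_stepB_fst (vb vs tl cl : List Int) (ends : List Int)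
    (s : Int × Int × Int × List Int × List Int × List Int) :
    (ends.foldl (pvStepB vb vs tl cl) s).1 =
      (match ends.getLast? with | none => s.1 | some L => L + 1) := by
  induction ends using List.reverseRecOn with
  | nil => rfl
  | append_singleton l e ih =>
      rw [List.foldl_append]
      simp [pvStepB]

-- xs[a:a] is empty
lemma slice_self (xs : List Int) (a : Int) (h : 0 ≤ a) :
    PySem.List.slice xs (some a) (some a) = [] := by
  obtain ⟨a', rfl⟩ : ∃ a' : Nat, a = (a' : Int) := ⟨a.toNat, (Int.toNat_of_nonneg h).symm⟩
  rw [PySem.List.slice_natCast]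
  simp

-- sum of xs[a:k+1] = sum of xs[a:k] + xs[k] (with out-of-range default 0)
lemma slice_sum_succ (xs : List Int) (a : Int) (k : Nat) (h0 : 0 ≤ a) (hk : a ≤ (k : Int)) :
    (PySem.List.slice xs (some a) (some ((k : Int) + 1))).sum =
      (PySem.List.slice xs (some a) (some (k : Int))).sum +
        (PySem.List.pyGet? xs (k : Int)).getD 0 := by
  obtain ⟨a', rfl⟩ : ∃ a' : Nat, a = (a' : Int) := ⟨a.toNat, (Int.toNat_of_nonneg h0).symm⟩
  have hk' : a' ≤ k := by exact_mod_cast hk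
  have h1 : (k : Int) + 1 = ((k + 1 : Nat) : Int) := by push_cast; ring
  rw [h1, PySem.List.slice_natCast, PySem.List.slice_natCast, PySem.List.pyGet?_natCast]
  have h2 : k + 1 - a' = (k - a') + 1 := by omega
  rw [h2, List.take_succ, List.sum_append, List.getElem?_drop]
  have h3 : a' + (k - a') = k := by omega
  rw [h3]
  cases xs[k]? <;> simp

-- the state of A's loop after k bars, expressed through B's quantities
def pvSpecState (vb vs tl cl : List Int) (bpb t tb ts : Int) (k : Nat) :
    Int × Int × Int × List Int × List Int × List Int :=
  let ends := pvEnds t bpb k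
  let st := ends.foldl (pvStepB vb vs tl cl)
    ((0 : Int), tb, ts, ([] : List Int), ([] : List Int), ([] : List Int))
  ((match ends.getLast? with | none => t + (k : Int) | some L => (k : Int) - 1 - L),
   st.2.1 + (PySem.List.slice vb (some st.1) (some (k : Int))).sum,
   st.2.2.1 + (PySem.List.slice vs (some st.1) (some (k : Int))).sum,
   st.2.2.2.1, st.2.2.2.2.1, st.2.2.2.2.2)

lemma main_invariant (vb vs tl cl : List Int) (bpb t tb ts : Int) (k : Nat) :
    (List.range k).foldl (pvStepA vb vs tl cl bpb) (t, tb, ts, [], [], []) =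
      pvSpecState vb vs tl cl bpb t tb ts k := by
  induction k with
  | zero =>
      have hends : pvEnds t bpb 0 = [] := by
        unfold pvEnds pvEndsLoop
        split_ifs with h1 h2 h3 <;> first | rfl | (exfalso; push_cast at *; omega)
      have h0 : ∀ xs : List Int, PySem.List.slice xs none (some (0 : Int)) = [] := by
        intro xs
        have := PySem.List.slice_to_natCast xs 0
        simpa using this
      simp [pvSpecState, hends, h0]
  | succ k ih =>
      rw [List.range_succ, List.foldl_append, List.foldl_cons, List.foldl_nil, ih]
      have hsucc := pvEnds_succ t bpb k
      have hcast : ((k + 1 : Nat) : Int) = (k : Int) + 1 := by push_cast; ring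
      rcases h : (pvEnds t bpb k).getLast? with _ | L
      · -- no bucket closed in the first k bars
        have hnil : pvEnds t bpb k = [] := List.getLast?_eq_none_iff.mp h
        rw [h] at hsucc
        dsimp only at hsucc
        by_cases hc : bpb - t - 1 = (k : Int)
        · -- bar k closes the first bucket
          rw [if_pos hc, hnil, List.nil_append] at hsucc
          simp only [pvSpecState, hsucc, hnil, List.getLast?_nil, List.getLast?_singleton,
            List.foldl_nil, List.foldl_cons, pvStepA, pvStepB]
          rw [if_pos (by omega : t + (k : Int) + 1 = bpb)]
          simp only [Prod.mk.injEq]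
          and_intros <;>
            first
              | trivial
              | (push_cast; omega)
              | (rw [hcast, slice_self _ _ (by omega)]; simp)
              | (rw [slice_sum_succ vb 0 k (by omega) (by exact_mod_cast Nat.zero_le k),
                    slice_sum_succ vs 0 k (by omega) (by exact_mod_cast Nat.zero_le k)]
                 ring_nf)
        · -- no bucket closes at bar k either
          rw [if_neg hc, hnil, List.nil_append] at hsucc
          simp only [pvSpecState, hsucc, hnil, List.getLast?_nil, List.foldl_nil, pvStepA]
          rw [if_neg (by omega : ¬ t + (k : Int) + 1 = bpb)]
          simp only [Prod.mk.injEq]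
          and_intros <;>
            first
              | trivial
              | (push_cast; omega)
              | (rw [hcast, slice_sum_succ vb 0 k (by omega) (by exact_mod_cast Nat.zero_le k)]
                 ring)
              | (rw [hcast, slice_sum_succ vs 0 k (by omega) (by exact_mod_cast Nat.zero_le k)]
                 ring)
      · -- a bucket has closed before; its end L gives the current start L + 1
        obtain ⟨hL0, hLk⟩ := pvEnds_last_bounds h
        rw [h] at hsucc
        dsimp only at hsucc
        have hfst := foldl_stepB_fst vb vs tl cl (pvEnds t bpb k)
          ((0 : Int), tb, ts, ([] : List Int), ([] : List Int), ([] : List Int))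
        rw [h] at hfst
        dsimp only at hfst
        by_cases hc : L + bpb = (k : Int)
        · -- bar k closes a bucket
          have hb1 : (1 : Int) ≤ bpb := by omega
          rw [if_pos ⟨hb1, hc⟩] at hsucc
          simp only [pvSpecState, hsucc, h, List.getLast?_concat, List.foldl_append,
            List.foldl_cons, List.foldl_nil, pvStepA, pvStepB, hfst]
          rw [if_pos (by omega : (k : Int) - 1 - L + 1 = bpb)]
          simp only [Prod.mk.injEq]
          and_intros <;>
            first
              | trivial
              | (push_cast; omega)
              | (rw [hcast, slice_self _ _ (by omega)]; simp)
              | (rw [slice_sum_succ vb (L + 1) k (by omega) (by omega),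
                    slice_sum_succ vs (L + 1) k (by omega) (by omega)]
                 ring_nf)
        · -- no bucket closes at bar k
          rw [if_neg (by omega : ¬ ((1 : Int) ≤ bpb ∧ L + bpb = (k : Int))),
            List.append_nil] at hsucc
          simp only [pvSpecState, hsucc, h, pvStepA, hfst]
          rw [if_neg (by omega : ¬ (k : Int) - 1 - L + 1 = bpb)]
          simp only [Prod.mk.injEq]
          and_intros <;>
            first
              | trivial
              | (push_cast; omega)
              | (rw [hcast, slice_sum_succ vb (L + 1) k (by omega) (by omega)]
                 ring)
              | (rw [hcast, slice_sum_succ vs (L + 1) k (by omega) (by omega)]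
                 ring)

-- ===== VERDICT (by name: the statement is the Claim_ definition above) =====
theorem constuct_buckets_update_spec : Claim_equal_constuct_buckets_update := by
  intro t tb ts vb vs tl cl bpb _ _
  unfold Spec_constuct_buckets_update constuct_buckets_update constuct_buckets_update_alt
  dsimp only
  rw [main_invariant, pvSpecState, foldl_stepB_fst]
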